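-- pv_equiv track=rewrite | github.com/sp9028/P1 | Rešitve starih izpitov/12.8.py | dovolj_lihih
-- ===== SOURCE A (Python) =====
-- def dovolj_lihih(s, n):
--     if s == [] and n > 0:
--         return False
--     if s == [] and n <= 0:
--         return True
--     elif s[0] % 2 == 1:
--         return dovolj_lihih(s[1:], n - 1)
--     else:
--         return dovolj_lihih(s[1:], n)
-- ===== SOURCE B (Python) =====
-- def dovolj_lihih(s, n):
--     return sum(1 for x in s if x % 2 == 1) >= n
-- ===== Notes on version B (the rewrite author's own statement) =====
-- stated objective: idiomatic
-- what changed: Replaces the recursive decrement-n scan with a single generator-sum count of odd elements compared against n.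
import Mathlib
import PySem

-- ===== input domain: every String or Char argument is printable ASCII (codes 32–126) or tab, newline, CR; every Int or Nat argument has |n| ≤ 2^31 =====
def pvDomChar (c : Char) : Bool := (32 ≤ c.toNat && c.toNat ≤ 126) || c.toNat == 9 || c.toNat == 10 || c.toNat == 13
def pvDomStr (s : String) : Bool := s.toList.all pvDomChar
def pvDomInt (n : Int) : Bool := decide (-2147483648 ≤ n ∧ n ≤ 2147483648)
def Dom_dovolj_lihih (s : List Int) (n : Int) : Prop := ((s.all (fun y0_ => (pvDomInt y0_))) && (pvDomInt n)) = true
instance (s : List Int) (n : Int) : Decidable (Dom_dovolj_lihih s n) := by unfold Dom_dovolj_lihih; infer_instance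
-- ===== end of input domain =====

-- B replaces A's recursive scan that decrements n with a single count-the-odds sum compared to n (idiomatic).

-- ===== PORT A =====
def dovolj_lihih (s : List Int) (n : Int) : Bool :=
  match s with
  | [] => if n > 0 then false else true
  | x :: rest =>
      if PySem.Int.mod x 2 == 1 then dovolj_lihih rest (n - 1)
      else dovolj_lihih rest n

-- ===== PORT B =====
-- sum(1 for x in s if x % 2 == 1) as a left fold, then compared with n
def dovolj_lihih_alt (s : List Int) (n : Int) : Bool :=
  decide (n ≤ s.foldl (fun acc x => if PySem.Int.mod x 2 == 1 then acc + 1 else acc) (0 : Int))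

-- ===== PRECONDITION & SPEC =====
def Spec_dovolj_lihih (s : List Int) (n : Int) (out : Bool) : Prop := out = dovolj_lihih_alt s n
instance (s : List Int) (n : Int) (out : Bool) : Decidable (Spec_dovolj_lihih s n out) := by unfold Spec_dovolj_lihih; infer_instance

-- ===== CLAIM (what is proved, stated in full; the proofs are below) =====
def Claim_equal_dovolj_lihih : Prop := ∀ (s : List Int) (n : Int), Dom_dovolj_lihih s n → Spec_dovolj_lihih s n (dovolj_lihih s n)

-- ===== LEMMAS AND PROOFS =====

theorem pv_foldl_shift (s : List Int) (c : Int) :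
    s.foldl (fun acc x => if PySem.Int.mod x 2 == 1 then acc + 1 else acc) c
      = c + s.foldl (fun acc x => if PySem.Int.mod x 2 == 1 then acc + 1 else acc) 0 := by
  induction s generalizing c with
  | nil => simp
  | cons x rest ih =>
    simp only [List.foldl]
    rw [ih (if PySem.Int.mod x 2 == 1 then c + 1 else c),
        ih (if PySem.Int.mod x 2 == 1 then (0:Int) + 1 else 0)]
    split <;> ring

theorem pv_main (s : List Int) (n : Int) : dovolj_lihih s n = dovolj_lihih_alt s n := by
  induction s generalizing n with
  | nil =>
    unfold dovolj_lihih dovolj_lihih_alt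
    by_cases h : n > 0 <;> simp [h] <;> omega
  | cons x rest ih =>
    unfold dovolj_lihih dovolj_lihih_alt
    simp only [List.foldl]
    by_cases h : PySem.Int.mod x 2 == 1 <;> simp only [h, if_true, if_false, ih,
      dovolj_lihih_alt, Bool.false_eq_true, reduceIte, decide_eq_decide]
    · rw [pv_foldl_shift rest ((0:Int) + 1)]
      omega

-- ===== VERDICT (by name: the statement is the Claim_ definition above) =====
theorem dovolj_lihih_spec : Claim_equal_dovolj_lihih := by
  intro s n _
  exact pv_main s n
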